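-- pv_equiv track=rewrite | github.com/Toqozz/yarn-python | generate.py | scroll
-- ===== SOURCE A (Python) =====
-- def scroll(beginning, str, characters):
--     # Definitions
--     str2 = ''                    # An additional string to work with [str]
--     final = ''                   # A final string to keep track of the characters that are being printed.
--     t = True                     # Boolean using in check for starting character.
--     array = []                   # List to hold all the strings.
--
--     # We add spaces to the front of the string to make it 'scroll' in from the right.
--     # '-' is used in the comment examples so that it is more readable.
--     for i in range(0, characters-1):
--         str2 = str2 + ' '
--
--     # Create the string '--------hello--------'
--     str = str2 + str
--     str = str + str2
--
--     for i in range(0, len(str)):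
--         # This if statement could probably be removed, but it is not doing any harm really being there.
--         if str[i] == ' ' and t == True: pass
--         else:
--             array.append(beginning + final + str[i] + '\n')
--             t = False
--
--         # Add the new character to the string.
--         final = final + str[i]
--
--         # If the length of final is equal to the maximum number of characters, cut off the first character
--         if len(final) > characters-1:
--             final = final[1:]
--
--     #if blank == True:
--         #for n in range(0, len(array)):
--             #array[n] = array[n].replace('-', ' ')
--
--     return array
-- ===== SOURCE B (Python) =====
-- def scroll(beginning, str, characters):
--     win = max(characters - 1, 0)
--     pad = ' ' * win
--     s = pad + str + pad
--     start = 0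
--     while start < len(s) and s[start] == ' ':
--         start += 1
--     return [beginning + s[max(0, i - win):i + 1] + '\n' for i in range(start, len(s))]
-- ===== Notes on version B (the rewrite author's own statement) =====
-- stated objective: simpler
-- what changed: B replaces A's stateful pass (running 'final' buffer with per-step trimming plus a suppression flag t) by computing the first non-space index of the padded string once and then emitting each frame as a direct slice s[max(0,i-win):i+1] in a single comprehension.
import Mathlib
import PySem

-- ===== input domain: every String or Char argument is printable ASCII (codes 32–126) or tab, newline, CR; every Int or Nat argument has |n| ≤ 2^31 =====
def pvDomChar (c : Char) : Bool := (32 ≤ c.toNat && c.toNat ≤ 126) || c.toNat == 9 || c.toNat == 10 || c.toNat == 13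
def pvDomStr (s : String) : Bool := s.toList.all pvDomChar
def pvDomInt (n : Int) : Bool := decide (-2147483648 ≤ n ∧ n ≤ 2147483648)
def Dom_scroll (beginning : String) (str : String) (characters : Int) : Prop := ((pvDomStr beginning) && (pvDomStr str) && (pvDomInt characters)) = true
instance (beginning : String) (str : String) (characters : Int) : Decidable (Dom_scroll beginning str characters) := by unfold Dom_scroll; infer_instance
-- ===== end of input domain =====

-- B builds each frame as a direct slice after a one-pass start-offset computation, instead of A's
-- running buffer + suppression flag; objective: simpler (same asymptotic cost).

-- ===== PORT A =====
-- loop body of A's main for-loop: state = (final, t, array); strings carried as List Char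
def scrollStepA (b : List Char) (characters : Int) (st : List Char × Bool × List (List Char)) (c : Char) : List Char × Bool × List (List Char) :=
  if c = ' ' ∧ st.2.1 = true then
    let final2 := st.1 ++ [c]
    (if (final2.length : Int) > characters - 1 then final2.drop 1 else final2, st.2.1, st.2.2)
  else
    let final2 := st.1 ++ [c]
    (if (final2.length : Int) > characters - 1 then final2.drop 1 else final2, false,
     st.2.2 ++ [b ++ st.1 ++ [c] ++ ['\n']])

def scroll (beginning : String) (str : String) (characters : Int) : List String :=
  let str2 := (PySem.List.pyRange 0 (characters - 1) 1).foldl (fun acc _ => acc ++ [' ']) ([] : List Char)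
  let s := str2 ++ str.toList ++ str2
  ((s.foldl (scrollStepA beginning.toList characters) ([], true, [])).2.2).map String.mk

-- ===== PORT B =====
-- B's while loop: index of the first non-space character (len(s) if none)
def scrollAltStart : List Char → Nat → Nat
  | [], k => k
  | c :: rest, k => if c = ' ' then scrollAltStart rest (k + 1) else k

def scroll_alt (beginning : String) (str : String) (characters : Int) : List String :=
  let win := max (characters - 1) 0
  let pad := List.replicate win.toNat ' '
  let s := pad ++ str.toList ++ pad
  let start := scrollAltStart s 0
  (PySem.List.pyRange (start : Int) (s.length : Int) 1).map (fun i =>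
    String.mk (beginning.toList ++ PySem.List.slice s (some (max 0 (i - win))) (some (i + 1)) ++ ['\n']))

-- ===== PRECONDITION & SPEC =====
def Spec_scroll (beginning : String) (str : String) (characters : Int) (out : List String) : Prop := out = scroll_alt beginning str characters
instance (beginning : String) (str : String) (characters : Int) (out : List String) : Decidable (Spec_scroll beginning str characters out) := by unfold Spec_scroll; infer_instance

-- ===== CLAIM (what is proved, stated in full; the proofs are below) =====
def Claim_equal_scroll : Prop := ∀ (beginning : String) (str : String) (characters : Int), Dom_scroll beginning str characters → Spec_scroll beginning str characters (scroll beginning str characters)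

-- ===== LEMMAS AND PROOFS =====


-- pad construction: A's space-appending loop builds a replicate
lemma scroll_pad_foldl (l : List Int) (init : List Char) :
    l.foldl (fun acc _ => acc ++ [' ']) init = init ++ List.replicate l.length ' ' := by
  induction l generalizing init with
  | nil => simp
  | cons x xs ih =>
    rw [List.foldl_cons, ih]
    simp [List.replicate_succ]

lemma scrollAltStart_ge (s : List Char) (k : Nat) : k ≤ scrollAltStart s k := by
  induction s generalizing k with
  | nil => simp [scrollAltStart]
  | cons c rest ih =>
    simp only [scrollAltStart]
    split
    · have := ih (k+1); omega
    · simp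
-- scrollAltStart shifts with its accumulator
lemma scrollAltStart_le (s : List Char) (k : Nat) : scrollAltStart s k ≤ k + s.length := by
  induction s generalizing k with
  | nil => simp [scrollAltStart]
  | cons c rest ih =>
    simp only [scrollAltStart, List.length_cons]
    split
    · have := ih (k+1); omega
    · simp

-- characterisation of the start index: the first m characters are all spaces iff start ≥ m
lemma scrollAltStart_ge_iff (s : List Char) (k m : Nat) (hm : m ≤ s.length) :
    k + m ≤ scrollAltStart s k ↔ (s.take m).all (fun c => decide (c = ' ')) = true := by
  induction s generalizing k m with
  | nil =>
    have : m = 0 := by simpa using hm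
    subst this; simpa using scrollAltStart_ge ([] : List Char) k
  | cons c rest ih =>
    cases m with
    | zero => simpa using scrollAltStart_ge (c :: rest) k
    | succ m =>
      simp only [scrollAltStart, List.take_succ_cons, List.all_cons]
      by_cases hc : c = ' '
      · have h1 := ih (k+1) m (by simpa using hm)
        simp only [List.all_eq_true, decide_eq_true_eq] at h1 ⊢
        simp only [hc, if_true, decide_true, Bool.true_and]
        rw [show k + (m + 1) = k + 1 + m by omega, h1]
        simp
      · simp only [hc, if_false, decide_false, Bool.false_and]
        constructor
        · intro h; omega
        · intro h; simp at h

-- the window condition of A's trim equals a comparison with the Nat window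
lemma scroll_trim_iff (ch : Int) (w L : Nat) (hw : (w : Int) = max (ch - 1) 0) (hL : 1 ≤ L) :
    ((L : Int) > ch - 1) ↔ L > w := by
  rcases le_total (ch - 1) 0 with h | h
  · rw [max_eq_right h] at hw; omega
  · rw [max_eq_left h] at hw; omega

-- main loop invariant for A's fold
lemma scroll_loopA (b : List Char) (ch : Int) (w : Nat) (hw : (w : Int) = max (ch - 1) 0)
    (s : List Char) (k : Nat) (hk : k ≤ s.length) :
    (s.take k).foldl (scrollStepA b ch) ([], true, []) =
      ((s.take k).drop (k - w),
       (s.take k).all (fun c => decide (c = ' ')),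
       ((List.range k).drop (scrollAltStart s 0)).map (fun i =>
          b ++ (s.take (i+1)).drop (i - w) ++ ['\n'])) := by
  induction k with
  | zero => simp
  | succ k ih =>
    have hk' : k < s.length := by omega
    have htake : s.take (k+1) = s.take k ++ [s[k]] := by
      rw [List.take_succ]; simp [List.getElem?_eq_getElem hk']
    rw [htake, List.foldl_append, ih (by omega), List.foldl_cons, List.foldl_nil]
    have hfinal2 : (s.take k).drop (k - w) ++ [s[k]] = (s.take k ++ [s[k]]).drop (k - w) := by
      rw [List.drop_append, List.length_take]
      have h0 : k - w - min k s.length = 0 := by omega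
      simp [h0]
    have hlen : ((s.take k).drop (k - w) ++ [s[k]]).length = (k+1) - (k - w) := by
      simp [List.length_drop, List.length_take]
      omega
    have hcond : ((((s.take k).drop (k - w) ++ [s[k]]).length : Int) > ch - 1) ↔ w ≤ k := by
      rw [scroll_trim_iff ch w _ hw (by rw [hlen]; omega), hlen]
      omega
    have hfin : (if ((((s.take k).drop (k - w) ++ [s[k]]).length : Int) > ch - 1)
          then ((s.take k).drop (k - w) ++ [s[k]]).drop 1
          else ((s.take k).drop (k - w) ++ [s[k]])) = (s.take k ++ [s[k]]).drop (k + 1 - w) := by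
      split_ifs with h
      · rw [hfinal2, List.drop_drop]
        have : k - w + 1 = k + 1 - w := by have := hcond.mp h; omega
        rw [this]
      · have hkw : k < w := by by_contra hge; exact h (hcond.mpr (by omega))
        rw [hfinal2]
        have h1 : k - w = 0 := by omega
        have h2 : k + 1 - w = 0 := by omega
        rw [h1, h2]
    by_cases hct : s[k] = ' ' ∧ ((s.take k).all fun c => decide (c = ' ')) = true
    · simp only [scrollStepA]
      rw [if_pos hct]
      have hall : ((s.take k ++ [s[k]]).all fun c => decide (c = ' ')) = true := by
        rw [List.all_append]
        simp only [List.all_cons, List.all_nil, hct.2, Bool.true_and, Bool.and_true,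
          decide_eq_true_eq]
        exact hct.1
      have hstart : k + 1 ≤ scrollAltStart s 0 := by
        have := (scrollAltStart_ge_iff s 0 (k+1) hk).2 (by rw [htake]; exact hall)
        omega
      refine Prod.ext ?_ (Prod.ext ?_ ?_)
      · exact hfin
      · exact (hct.2.trans hall.symm)
      · show List.map _ (List.drop (scrollAltStart s 0) (List.range k)) = _
        have e1 : (List.drop (scrollAltStart s 0) (List.range k)) = [] :=
          List.drop_eq_nil_of_le (by simpa using Nat.le_of_succ_le hstart)
        have e2 : (List.drop (scrollAltStart s 0) (List.range (k+1))) = [] :=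
          List.drop_eq_nil_of_le (by simpa using hstart)
        rw [e1, e2]
    · simp only [scrollStepA]
      rw [if_neg hct]
      have hallf : ((s.take k ++ [s[k]]).all fun c => decide (c = ' ')) = false := by
        rw [List.all_append]
        rcases Bool.eq_false_or_eq_true ((s.take k).all fun c => decide (c = ' ')) with hb | hb
        · have hcne : ¬ s[k] = ' ' := fun hce => hct ⟨hce, hb⟩
          rw [hb, Bool.true_and]
          simp [hcne]
        · rw [hb, Bool.false_and]
      have hstart : scrollAltStart s 0 ≤ k := by
        by_contra hgt
        have h2 := (scrollAltStart_ge_iff s 0 (k+1) hk).1 (by omega)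
        rw [htake] at h2
        rw [h2] at hallf
        simp at hallf
      refine Prod.ext ?_ (Prod.ext ?_ ?_)
      · exact hfin
      · exact hallf.symm
      · have harr :
            List.map (fun i => b ++ List.drop (i - w) (List.take (i + 1) s) ++ ['\n'])
                (List.drop (scrollAltStart s 0) (List.range k)) ++
              [b ++ List.drop (k - w) (List.take k s) ++ [s[k]] ++ ['\n']] =
            List.map (fun i => b ++ List.drop (i - w) (List.take (i + 1) s) ++ ['\n'])
              (List.drop (scrollAltStart s 0) (List.range (k+1))) := by
          rw [List.range_succ, List.drop_append, List.length_range,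
              Nat.sub_eq_zero_of_le hstart, List.drop_zero, List.map_append,
              List.map_cons, List.map_nil, htake, ← hfinal2]
          simp
        exact harr

-- ===== VERDICT (by name: the statement is the Claim_ definition above) =====
-- final assembly: both programs over the common padded list, A via the loop invariant
theorem scroll_spec : Claim_equal_scroll := by
  intro beginning str characters _
  unfold Spec_scroll
  simp only [scroll, scroll_alt]
  have hww : (characters - 1 - 0).toNat = (max (characters - 1) 0).toNat := by omega
  have hw : (((max (characters - 1) 0).toNat : Nat) : Int) = max (characters - 1) 0 :=
    Int.toNat_of_nonneg (le_max_right _ _)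
  rw [scroll_pad_foldl, PySem.List.length_pyRange_one, hww, List.nil_append]
  set w : Nat := (max (characters - 1) 0).toNat with hwdef
  set s : List Char := List.replicate w ' ' ++ str.toList ++ List.replicate w ' ' with hsdef
  have hinv := scroll_loopA beginning.toList characters w hw s s.length (le_refl _)
  rw [List.take_length] at hinv
  rw [hinv]
  have hstart_le : scrollAltStart s 0 ≤ s.length := by
    have := scrollAltStart_le s 0; omega
  have hm : (((s.length : Int) - (scrollAltStart s 0 : Int)).toNat) = s.length - scrollAltStart s 0 := by
    omega
  rw [PySem.List.pyRange_one, hm]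
  have hdrop : (List.range s.length).drop (scrollAltStart s 0) =
      (List.range (s.length - scrollAltStart s 0)).map (fun j => scrollAltStart s 0 + j) := by
    conv_lhs => rw [show s.length = scrollAltStart s 0 + (s.length - scrollAltStart s 0) by omega,
      List.range_add]
    rw [List.drop_append, List.length_range, Nat.sub_self, List.drop_zero,
        List.drop_eq_nil_of_le (by rw [List.length_range]), List.nil_append]
  rw [hdrop]
  simp only [List.map_map]
  refine List.map_congr_left ?_
  intro j hj
  simp only [Function.comp_apply]
  have hmax : max 0 ((scrollAltStart s 0 : Int) + (j : Int) - max (characters - 1) 0) =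
      ((scrollAltStart s 0 + j - w : Nat) : Int) := by omega
  have hone : ((scrollAltStart s 0 : Int) + (j : Int) + 1) = ((scrollAltStart s 0 + j + 1 : Nat) : Int) := by
    omega
  rw [hmax, hone, PySem.List.slice_natCast, List.drop_take]
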